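-- pv_equiv track=rewrite | github.com/taousoumaouche/piege_python | pieges.py | verifier_fin_jeu_et_compter_billes
-- ===== SOURCE A (Python) =====
-- def verifier_fin_jeu_et_compter_billes(grille, jouer_a_1):
--     """
--     Vérifie si le jeu est terminé et compte les billes sur la grille.
--     Cette fonction pourrait par exemple vérifier si toutes les billes sont tombées dans des trous,
--     ou si un joueur a atteint un certain score.
--
--     Args:
--         grille (list): La grille de jeu.
--         jouer_a_1 (bool): Un booléen indiquant si le jeu est en mode solo (True) ou multi-joueur (False).
--
--     Returns:
--         tuple: Un booléen indiquant si le jeu est terminé, et un entier représentant le nombre de billes.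
--     >>> grille = creer_grille()
--     >>> jeu_termine, nombre_billes = verifier_fin_jeu_et_compter_billes(grille, True)
--     >>> type(jeu_termine)
--     <class 'bool'>
--     >>> type(nombre_billes)
--     <class 'list'>
--     """
--     joueurs_restants = [0, 0, 0, 0]  # Pour compter le nbr de billes restantes de chaque joueur
--     for ligne in grille:
--         for case in ligne:
--             if case in ['1', '2', '3', '4']:
--                 joueur_index = int(case) - 1 # Si la case contient le numéro d'un joueur,cette ligne convertit cette chaîne de caractères en un entier  et soustrait 1 pour obtenir l'indice correspondant
--                 joueurs_restants[joueur_index] += 1 #Cette ligne incrémente le compteur de billes pour lejoueur correspondant à l'indice joueur_index dans la listejoueurs_restants. Cela compte le nombre de billes de chaque joueur sur la grille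
--
--     if jouer_a_1:
--         for billes in joueurs_restants:
--             if billes > 0:   #si le joueur a encore des billes sur la grille
--                 return False, joueurs_restants  # Des billes sont encore sur la grille (jeu pas terminé)
--         return True, joueurs_restants  # Toutes les billes sont tombées
--     else:
--         # Vérifier pour les autres modes
--         joueurs_avec_billes = sum(1 for billes in joueurs_restants if billes > 0) #compter le nombre de joueurs ayant encore des billes sur la grille. Elle parcourt la liste joueurs_restants et ajoute 1 à chaque fois que le compteur de billes de ce joueur est supérieur à zéro.
--         return joueurs_avec_billes <= 1, joueurs_restants #retourne True si joueurs_avec_billes est inférieur ou égal à 1, ce qui signifie qu'il ne reste qu'un joueur ou aucun joueur avec des billes sur la grille, indiquant ainsi que le jeu est terminé en mode multijoueur. Elle renvoie également la liste joueurs_restants qui contient le nombre de billes de chaque joueur.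
-- ===== SOURCE B (Python) =====
-- def verifier_fin_jeu_et_compter_billes(grille, jouer_a_1):
--     # Stage 1: a count vector per row, Stage 2: column-wise sums.
--     par_ligne = [[ligne.count(str(j)) for j in range(1, 5)] for ligne in grille]
--     joueurs_restants = [sum(cpt[j] for cpt in par_ligne) for j in range(4)]
--     # Termination via order statistics: solo done iff no marble at all (total == 0);
--     # multi done iff all remaining marbles belong to a single player (total == max).
--     total = sum(joueurs_restants)
--     maxi = max(joueurs_restants)
--     return (total == 0 if jouer_a_1 else total == maxi), joueurs_restants
-- ===== Notes on version B (the rewrite author's own statement) =====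
-- stated objective: alternative
-- what changed: Replaces A's single-pass per-cell index accumulation and per-mode player scans by a staged pipeline (per-row count vectors, then column sums) and decides termination by order statistics: total==0 for solo, total==max (all marbles belong to one player) for multiplayer.
import Mathlib
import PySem

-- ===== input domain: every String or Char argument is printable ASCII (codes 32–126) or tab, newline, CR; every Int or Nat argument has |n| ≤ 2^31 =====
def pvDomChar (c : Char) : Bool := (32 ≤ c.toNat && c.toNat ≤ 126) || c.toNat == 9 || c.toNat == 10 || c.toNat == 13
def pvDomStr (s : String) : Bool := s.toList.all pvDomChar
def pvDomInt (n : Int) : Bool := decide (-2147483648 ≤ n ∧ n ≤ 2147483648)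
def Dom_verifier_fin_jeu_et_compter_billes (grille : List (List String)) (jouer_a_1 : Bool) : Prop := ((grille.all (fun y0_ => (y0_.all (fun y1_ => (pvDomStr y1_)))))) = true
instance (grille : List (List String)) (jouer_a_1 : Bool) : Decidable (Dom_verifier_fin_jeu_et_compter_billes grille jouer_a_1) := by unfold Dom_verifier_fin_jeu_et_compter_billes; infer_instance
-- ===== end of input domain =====

-- B replaces A's per-cell index accumulation and per-mode player scans with per-row count
-- vectors summed column-wise, deciding termination by order statistics (total vs max).


-- ===== PORT A =====
-- body of the inner loop: `if case in ['1','2','3','4']: joueurs_restants[int(case)-1] += 1`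
-- (the membership guard guarantees int(case) succeeds and the index is 0..3, so getD/set are exact)
def pvA_step (j : List Int) (case : String) : List Int :=
  if case ∈ ["1", "2", "3", "4"] then
    let joueur_index := ((PySem.Int.ofStr? case).getD 0 - 1).toNat
    j.set joueur_index (j.getD joueur_index 0 + 1)
  else j

-- solo branch: `for billes in joueurs_restants: if billes > 0: return False …; return True`
def pvA_solo : List Int → Bool
  | [] => true
  | billes :: rest => if billes > 0 then false else pvA_solo rest

def verifier_fin_jeu_et_compter_billes (grille : List (List String)) (jouer_a_1 : Bool) : Bool × List Int :=
  let joueurs_restants := grille.foldl (fun j ligne => ligne.foldl pvA_step j) [0, 0, 0, 0]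
  if jouer_a_1 then
    (pvA_solo joueurs_restants, joueurs_restants)
  else
    let joueurs_avec_billes : Int :=
      joueurs_restants.foldl (fun acc billes => if billes > 0 then acc + 1 else acc) 0
    (joueurs_avec_billes ≤ 1, joueurs_restants)

-- ===== PORT B =====
def verifier_fin_jeu_et_compter_billes_alt (grille : List (List String)) (jouer_a_1 : Bool) : Bool × List Int :=
  -- par_ligne = [[ligne.count(str(j)) for j in range(1,5)] for ligne in grille]
  let par_ligne := grille.map (fun ligne =>
    (PySem.List.pyRange 1 5 1).map (fun j => (ligne.count (PySem.Int.toStr j) : Int)))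
  -- joueurs_restants = [sum(cpt[j] for cpt in par_ligne) for j in range(4)]
  -- (cpt[j]: j ∈ 0..3 and every cpt has exactly 4 entries, so plain getD is exact here)
  let joueurs_restants := (PySem.List.pyRange 0 4 1).map (fun j =>
    par_ligne.foldl (fun s cpt => s + cpt.getD j.toNat 0) 0)
  let total := joueurs_restants.foldl (· + ·) 0
  -- max(joueurs_restants): the list has 4 elements, so Python's max never raises; getD 0 is exact
  let maxi := (PySem.List.max? joueurs_restants (fun x => x)).getD 0
  ((if jouer_a_1 then total = 0 else total = maxi), joueurs_restants)

-- ===== PRECONDITION & SPEC =====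
def Spec_verifier_fin_jeu_et_compter_billes (grille : List (List String)) (jouer_a_1 : Bool) (out : Bool × List Int) : Prop := out = verifier_fin_jeu_et_compter_billes_alt grille jouer_a_1
instance (grille : List (List String)) (jouer_a_1 : Bool) (out : Bool × List Int) : Decidable (Spec_verifier_fin_jeu_et_compter_billes grille jouer_a_1 out) := by unfold Spec_verifier_fin_jeu_et_compter_billes; infer_instance

-- ===== CLAIM =====
def Claim_equal_verifier_fin_jeu_et_compter_billes : Prop := ∀ (grille : List (List String)) (jouer_a_1 : Bool), Dom_verifier_fin_jeu_et_compter_billes grille jouer_a_1 → Spec_verifier_fin_jeu_et_compter_billes grille jouer_a_1 (verifier_fin_jeu_et_compter_billes grille jouer_a_1)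

-- ===== LEMMAS AND PROOFS =====

-- pvA_step on each of the four literal marble strings, by computation.
lemma pvA_step_1 (a b c d : Int) : pvA_step [a, b, c, d] "1" = [a + 1, b, c, d] := rfl
lemma pvA_step_2 (a b c d : Int) : pvA_step [a, b, c, d] "2" = [a, b + 1, c, d] := rfl
lemma pvA_step_3 (a b c d : Int) : pvA_step [a, b, c, d] "3" = [a, b, c + 1, d] := rfl
lemma pvA_step_4 (a b c d : Int) : pvA_step [a, b, c, d] "4" = [a, b, c, d + 1] := rfl

-- A's counting loop over any cell list computes the four occurrence counts, shifted by the start state.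
lemma pvA_foldl_counts (cells : List String) (a b c d : Int) :
    cells.foldl pvA_step [a, b, c, d] =
      [a + cells.count "1", b + cells.count "2", c + cells.count "3", d + cells.count "4"] := by
  induction cells generalizing a b c d with
  | nil => simp
  | cons x xs ih =>
    by_cases h1 : x = "1"
    · subst h1; simp [List.foldl_cons, pvA_step_1, ih]; omega
    · by_cases h2 : x = "2"
      · subst h2; simp [List.foldl_cons, pvA_step_2, ih]; omega
      · by_cases h3 : x = "3"
        · subst h3; simp [List.foldl_cons, pvA_step_3, ih]; omega
        · by_cases h4 : x = "4"
          · subst h4; simp [List.foldl_cons, pvA_step_4, ih]; omega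
          · simp [List.foldl_cons, pvA_step, h1, h2, h3, h4, ih]

-- A's nested loops are the single loop over the flattened grid.
lemma pvA_nested_eq_flat (grille : List (List String)) (j : List Int) :
    grille.foldl (fun j ligne => ligne.foldl pvA_step j) j =
      (grille.flatMap (fun ligne => ligne)).foldl pvA_step j := by
  induction grille generalizing j with
  | nil => simp
  | cons l ls ih => simp [List.foldl_cons, List.flatMap_cons, List.foldl_append, ih]

-- B's column sum of per-row counts of s equals the count of s over the flattened grid.
lemma pvB_colsum (grille : List (List String)) (s : String) (acc : Int) :
    grille.foldl (fun a ligne => a + ((ligne.count s : Nat) : Int)) acc =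
      acc + ((grille.flatMap (fun ligne => ligne)).count s : Int) := by
  induction grille generalizing acc with
  | nil => simp
  | cons l ls ih =>
    simp [List.foldl_cons, List.flatMap_cons, List.count_append, ih]
    ring

-- solo flag: A's short-circuit scan equals "total = 0" on four nonnegative counts.
lemma pv_solo_eq (n1 n2 n3 n4 : Nat) :
    pvA_solo [(n1 : Int), n2, n3, n4] =
      decide ((((((0 : Int) + n1) + n2) + n3) + n4) = 0) := by
  by_cases h1 : 0 < n1 <;> by_cases h2 : 0 < n2 <;> by_cases h3 : 0 < n3 <;> by_cases h4 : 0 < n4 <;>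
    simp [pvA_solo, h1, h2, h3, h4] <;> omega

-- multi flag: A's nonzero-player count ≤ 1 equals "total = max" on four nonnegative counts.
lemma pv_multi_eq (n1 n2 n3 n4 : Nat) :
    decide (List.foldl (fun acc billes => if billes > 0 then acc + 1 else acc) (0 : Int) [(n1 : Int), n2, n3, n4] ≤ 1)
      = decide ((((((0 : Int) + n1) + n2) + n3) + n4) = List.foldl max (n1 : Int) [(n2 : Int), (n3 : Int), (n4 : Int)]) := by
  by_cases h1 : 0 < n1 <;> by_cases h2 : 0 < n2 <;> by_cases h3 : 0 < n3 <;> by_cases h4 : 0 < n4 <;>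
    simp [List.foldl_cons, h1, h2, h3, h4] <;> omega

-- ===== VERDICT =====
theorem verifier_fin_jeu_et_compter_billes_spec : Claim_equal_verifier_fin_jeu_et_compter_billes := by
  intro grille jouer_a_1 _
  unfold Spec_verifier_fin_jeu_et_compter_billes
  unfold verifier_fin_jeu_et_compter_billes verifier_fin_jeu_et_compter_billes_alt
  have hr1 : PySem.List.pyRange 1 5 1 = [1, 2, 3, 4] := by decide
  have hr0 : PySem.List.pyRange 0 4 1 = [0, 1, 2, 3] := by decide
  have hs1 : PySem.Int.toStr 1 = "1" := by decide
  have hs2 : PySem.Int.toStr 2 = "2" := by decide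
  have hs3 : PySem.Int.toStr 3 = "3" := by decide
  have hs4 : PySem.Int.toStr 4 = "4" := by decide
  rw [hr0, hr1, pvA_nested_eq_flat, pvA_foldl_counts]
  simp only [hs1, hs2, hs3, hs4, List.map_cons, List.map_nil, List.foldl_map,
    show Int.toNat 0 = 0 from rfl, show Int.toNat 1 = 1 from rfl,
    show Int.toNat 2 = 2 from rfl, show Int.toNat 3 = 3 from rfl,
    List.getD_cons_zero, List.getD_cons_succ]
  rw [pvB_colsum, pvB_colsum, pvB_colsum, pvB_colsum]
  simp only [zero_add, PySem.List.max?_id_cons, Option.getD_some]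
  cases jouer_a_1
  · rw [if_neg (by simp), if_neg (by simp), pv_multi_eq]
    simp [List.foldl_cons]
  · rw [if_pos rfl, if_pos rfl, pv_solo_eq]
    simp [List.foldl_cons]
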